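-- pv_equiv track=rewrite | github.com/rishabhraaj17/MastersThesis | src/position_maps/analysis.py | split_track_ids_into_chunks_of_indices
-- ===== SOURCE A (Python) =====
-- def split_track_ids_into_chunks_of_indices(idx_list):
--     search_num = idx_list[0]
--     splits_idx = []
--     temp = []
--     for i, e in enumerate(idx_list):
--         if e == search_num:
--             temp.append(i)
--         else:
--             splits_idx.append(temp)
--             search_num = e
--             temp = [i]
--     splits_idx.append(temp)
--     return splits_idx
-- ===== SOURCE B (Python) =====
-- def split_track_ids_into_chunks_of_indices(idx_list):
--     # two-pointer run scan: for each run starting at i, advance j to the run's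
--     # end, emit range(i, j), continue from j
--     n = len(idx_list)
--     chunks = []
--     i = 0
--     while i < n:
--         j = i + 1
--         while j < n and idx_list[j] == idx_list[i]:
--             j += 1
--         chunks.append(list(range(i, j)))
--         i = j
--     return chunks
-- ===== Notes on version B (the rewrite author's own statement) =====
-- stated objective: alternative
-- what changed: Replaces A's state-machine fold (tracking search_num and a mutable temp accumulator over enumerate) with a two-pointer scan that finds each run's end index directly and emits range(i, j) per run; Pre_ excludes the empty list, on which A raises IndexError.
import Mathlib
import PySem

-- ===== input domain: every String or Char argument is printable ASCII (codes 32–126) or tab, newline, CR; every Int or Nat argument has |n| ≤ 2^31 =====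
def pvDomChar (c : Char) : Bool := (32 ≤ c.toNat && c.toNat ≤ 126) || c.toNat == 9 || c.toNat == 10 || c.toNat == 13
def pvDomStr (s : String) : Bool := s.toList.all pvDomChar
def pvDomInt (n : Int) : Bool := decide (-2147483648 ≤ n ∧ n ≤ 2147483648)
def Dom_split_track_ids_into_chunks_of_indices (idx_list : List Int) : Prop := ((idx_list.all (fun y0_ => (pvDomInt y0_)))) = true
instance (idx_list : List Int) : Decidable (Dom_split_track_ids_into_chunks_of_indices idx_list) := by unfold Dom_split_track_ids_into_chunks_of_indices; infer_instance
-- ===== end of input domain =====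

-- B replaces A's transition-tracking accumulator with a two-pointer run scan emitting range(i, j) per run (objective: alternative).

-- ===== PORT A =====
-- the loop body of A's for-loop over enumerate(idx_list); state = (search_num, splits_idx, temp)
def pvAStep (st : Int × List (List Int) × List Int) (ie : Int × Int) :
    Int × List (List Int) × List Int :=
  if ie.2 == st.1 then (st.1, st.2.1, st.2.2 ++ [ie.1])
  else (ie.2, st.2.1 ++ [st.2.2], [ie.1])

def split_track_ids_into_chunks_of_indices (idx_list : List Int) : List (List Int) :=
  -- idx_list[0] raises IndexError on []; Pre_ excludes the empty list, so getD is exact here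
  let search_num := idx_list.getD 0 0
  let s := (PySem.List.enumerate idx_list).foldl pvAStep (search_num, [], [])
  s.2.1 ++ [s.2.2]

-- ===== PORT B =====
-- inner while loop: advance j while j < n and idx_list[j] == idx_list[i]
-- (fuel = remaining indices, a totality guard only; getD exact: j in range under the guard)
def pvBInner (xs : List Int) (v : Int) (j : Nat) : Nat → Nat
  | 0 => j
  | fuel + 1 =>
    if j < xs.length then
      if xs.getD j 0 == v then pvBInner xs v (j + 1) fuel else j
    else j

-- outer while loop: one chunk per run (fuel = remaining indices, a totality guard only)
def pvBOuter (xs : List Int) (i : Nat) : Nat → List (List Int)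
  | 0 => []
  | fuel + 1 =>
    if i < xs.length then
      let j := pvBInner xs (xs.getD i 0) (i + 1) (xs.length - (i + 1))
      PySem.List.pyRange (i : Int) (j : Int) 1 :: pvBOuter xs j fuel
    else []

def split_track_ids_into_chunks_of_indices_alt (idx_list : List Int) : List (List Int) :=
  pvBOuter idx_list 0 idx_list.length

-- ===== PRECONDITION & SPEC =====
-- Pre_ excludes exactly the empty list, on which A raises IndexError (idx_list[0]).
def Pre_split_track_ids_into_chunks_of_indices (idx_list : List Int) : Prop := idx_list ≠ []
instance (idx_list : List Int) : Decidable (Pre_split_track_ids_into_chunks_of_indices idx_list) := by unfold Pre_split_track_ids_into_chunks_of_indices; infer_instance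

def pvWitness_split_track_ids_into_chunks_of_indices : List Int := [5, 5, 2, 2, 2, 7]

def Spec_split_track_ids_into_chunks_of_indices (idx_list : List Int) (out : List (List Int)) : Prop := out = split_track_ids_into_chunks_of_indices_alt idx_list
instance (idx_list : List Int) (out : List (List Int)) : Decidable (Spec_split_track_ids_into_chunks_of_indices idx_list out) := by unfold Spec_split_track_ids_into_chunks_of_indices; infer_instance

-- ===== CLAIM (what is proved, stated in full; the proofs are below) =====
def Claim_equal_split_track_ids_into_chunks_of_indices : Prop := ∀ (idx_list : List Int), Dom_split_track_ids_into_chunks_of_indices idx_list → Pre_split_track_ids_into_chunks_of_indices idx_list → Spec_split_track_ids_into_chunks_of_indices idx_list (split_track_ids_into_chunks_of_indices idx_list)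


-- ===== LEMMAS AND PROOFS =====

-- enumerate of a suffix, one step
theorem pvEnumStep (xs : List Int) (k : Nat) (h : k < xs.length) :
    PySem.List.enumerate (xs.drop k) (k : Int)
      = ((k : Int), xs.getD k 0) :: PySem.List.enumerate (xs.drop (k + 1)) ((k + 1 : Nat) : Int) := by
  rw [List.drop_eq_getElem_cons h, PySem.List.enumerate_cons]
  simp [List.getD_eq_getElem?_getD, List.getElem?_eq_getElem h]

theorem pvBInner_ge (xs : List Int) (v : Int) :
    ∀ (f j : Nat), j ≤ pvBInner xs v j f := by
  intro f
  induction f with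
  | zero => intro j; rw [pvBInner]
  | succ f ih =>
    intro j
    rw [pvBInner]
    split
    · split
      · have := ih (j + 1); omega
      · exact le_refl j
    · exact le_refl j

theorem pvBInner_eq_succ (xs : List Int) (v : Int) (j f : Nat)
    (h1 : j < xs.length) (h2 : xs.getD j 0 = v) :
    pvBInner xs v j (f + 1) = pvBInner xs v (j + 1) f := by
  rw [pvBInner, if_pos h1, if_pos (by simpa using h2)]

theorem pvBInner_eq_self (xs : List Int) (v : Int) (j f : Nat)
    (h : ¬ j < xs.length ∨ xs.getD j 0 ≠ v) : pvBInner xs v j f = j := by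
  cases f with
  | zero => rw [pvBInner]
  | succ f =>
    rw [pvBInner]
    by_cases hk : j < xs.length
    · rcases h with h | h
      · exact absurd hk h
      · rw [if_pos hk, if_neg (by simpa using h)]
    · rw [if_neg hk]

theorem pvBInner_stop (xs : List Int) (v : Int) :
    ∀ (f j : Nat), xs.length - j ≤ f → pvBInner xs v j f < xs.length →
      xs.getD (pvBInner xs v j f) 0 ≠ v := by
  intro f
  induction f with
  | zero =>
    intro j hf h
    rw [pvBInner] at h ⊢
    omega
  | succ f ih =>
    intro j hf h
    by_cases hk : j < xs.length
    · by_cases hv : xs.getD j 0 = v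
      · rw [pvBInner_eq_succ xs v j f hk hv] at h ⊢
        exact ih (j + 1) (by omega) h
      · rw [pvBInner_eq_self xs v j (f + 1) (Or.inr hv)]
        exact hv
    · rw [pvBInner_eq_self xs v j (f + 1) (Or.inl hk)] at h
      omega

-- prepend the run's start index to the rest of its range
theorem pvCons_range (k j : Nat) (h : k < j) :
    ((k : Int)) :: PySem.List.pyRange ((k + 1 : Nat) : Int) ((j : Nat) : Int) 1
      = PySem.List.pyRange ((k : Nat) : Int) ((j : Nat) : Int) 1 := by
  conv_rhs => rw [PySem.List.pyRange_one_cons (by exact_mod_cast h)]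
  push_cast
  rfl

-- inner lemma: A's fold consumes a whole run of value v exactly as pvBInner delimits it
theorem pvN (xs : List Int) :
    ∀ (f k : Nat) (v : Int) (sp : List (List Int)) (t : List Int), xs.length - k ≤ f →
      (PySem.List.enumerate (xs.drop k) (k : Int)).foldl pvAStep (v, sp, t)
        = (PySem.List.enumerate (xs.drop (pvBInner xs v k f)) ((pvBInner xs v k f : Nat) : Int)).foldl
            pvAStep (v, sp, t ++ PySem.List.pyRange (k : Int) ((pvBInner xs v k f : Nat) : Int) 1) := by
  intro f
  induction f with
  | zero =>
    intro k v sp t hf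
    rw [pvBInner]
    simp [PySem.List.pyRange_one_eq_nil (le_refl ((k : Nat) : Int))]
  | succ f ih =>
    intro k v sp t hf
    by_cases hk : k < xs.length
    · by_cases hv : xs.getD k 0 = v
      · rw [pvBInner_eq_succ xs v k f hk hv, pvEnumStep xs k hk]
        simp only [List.foldl_cons]
        have hstep : pvAStep (v, sp, t) ((k : Int), xs.getD k 0) = (v, sp, t ++ [(k : Int)]) := by
          simp only [pvAStep]
          rw [if_pos (by simpa using hv)]
        rw [hstep, ih (k + 1) v sp (t ++ [(k : Int)]) (by omega)]
        have hge := pvBInner_ge xs v f (k + 1)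
        have harg : (t ++ [(k : Int)]) ++ PySem.List.pyRange ((k + 1 : Nat) : Int)
              ((pvBInner xs v (k + 1) f : Nat) : Int) 1
            = t ++ PySem.List.pyRange ((k : Nat) : Int) ((pvBInner xs v (k + 1) f : Nat) : Int) 1 := by
          rw [List.append_assoc, List.singleton_append,
            pvCons_range k (pvBInner xs v (k + 1) f) (by omega)]
        rw [harg]
      · rw [pvBInner_eq_self xs v k (f + 1) (Or.inr hv)]
        simp [PySem.List.pyRange_one_eq_nil (le_refl ((k : Nat) : Int))]
    · rw [pvBInner_eq_self xs v k (f + 1) (Or.inl hk)]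
      simp [PySem.List.pyRange_one_eq_nil (le_refl ((k : Nat) : Int))]

-- outer lemma: from a run boundary, A's finished fold equals sp ++ [t] ++ B's remaining chunks
theorem pvM (xs : List Int) :
    ∀ (f k : Nat) (v : Int) (sp : List (List Int)) (t : List Int), xs.length - k ≤ f →
      (k < xs.length → xs.getD k 0 ≠ v) →
      (let s := (PySem.List.enumerate (xs.drop k) (k : Int)).foldl pvAStep (v, sp, t)
       s.2.1 ++ [s.2.2]) = (sp ++ [t]) ++ pvBOuter xs k f := by
  intro f
  induction f with
  | zero =>
    intro k v sp t hf hb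
    rw [pvBOuter]
    simp [List.drop_eq_nil_of_le (by omega : xs.length ≤ k)]
  | succ f ih =>
    intro k v sp t hf hb
    by_cases hk : k < xs.length
    · have hv := hb hk
      rw [pvEnumStep xs k hk]
      simp only [List.foldl_cons]
      have hstep : pvAStep (v, sp, t) ((k : Int), xs.getD k 0)
          = (xs.getD k 0, sp ++ [t], [(k : Int)]) := by
        simp only [pvAStep]
        rw [if_neg (by simpa using hv)]
      rw [hstep]
      have hge := pvBInner_ge xs (xs.getD k 0) (xs.length - (k + 1)) (k + 1)
      rw [pvN xs (xs.length - (k + 1)) (k + 1) (xs.getD k 0) (sp ++ [t]) [(k : Int)] (by omega)]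
      rw [ih (pvBInner xs (xs.getD k 0) (k + 1) (xs.length - (k + 1))) (xs.getD k 0) (sp ++ [t])
            ([(k : Int)] ++ PySem.List.pyRange ((k + 1 : Nat) : Int)
              ((pvBInner xs (xs.getD k 0) (k + 1) (xs.length - (k + 1)) : Nat) : Int) 1)
            (by omega)
            (pvBInner_stop xs (xs.getD k 0) (xs.length - (k + 1)) (k + 1) (by omega))]
      rw [List.singleton_append,
        pvCons_range k (pvBInner xs (xs.getD k 0) (k + 1) (xs.length - (k + 1))) (by omega)]
      conv_rhs => rw [pvBOuter]
      rw [if_pos hk]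
      simp [List.append_assoc]
    · rw [pvBOuter]
      rw [if_neg hk]
      simp [List.drop_eq_nil_of_le (by omega : xs.length ≤ k)]

-- ===== VERDICT (by name: the statement is the Claim_ definition above) =====
theorem split_track_ids_into_chunks_of_indices_spec : Claim_equal_split_track_ids_into_chunks_of_indices := by
  intro xs _ hpre
  have hlen : 0 < xs.length := List.length_pos_iff.mpr hpre
  obtain ⟨m, hm⟩ : ∃ m, xs.length = m + 1 := ⟨xs.length - 1, by omega⟩
  unfold Spec_split_track_ids_into_chunks_of_indices
  simp only [split_track_ids_into_chunks_of_indices, split_track_ids_into_chunks_of_indices_alt]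
  have h0 : PySem.List.enumerate xs = PySem.List.enumerate (xs.drop 0) ((0 : Nat) : Int) := by
    norm_num
  rw [h0, pvN xs xs.length 0 (xs.getD 0 0) [] [] (by omega)]
  have hge := pvBInner_ge xs (xs.getD 0 0) xs.length 0
  rw [pvM xs m (pvBInner xs (xs.getD 0 0) 0 xs.length) (xs.getD 0 0) []
        ([] ++ PySem.List.pyRange ((0 : Nat) : Int) ((pvBInner xs (xs.getD 0 0) 0 xs.length : Nat) : Int) 1)
        ?hfuel (pvBInner_stop xs (xs.getD 0 0) xs.length 0 (by omega))]
  case hfuel =>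
    have h1 : pvBInner xs (xs.getD 0 0) 0 xs.length = pvBInner xs (xs.getD 0 0) 1 m := by
      rw [hm, pvBInner_eq_succ xs (xs.getD 0 0) 0 m hlen rfl]
    have := pvBInner_ge xs (xs.getD 0 0) m 1
    omega
  have h1 : pvBInner xs (xs.getD 0 0) 0 xs.length = pvBInner xs (xs.getD 0 0) 1 m := by
    rw [hm, pvBInner_eq_succ xs (xs.getD 0 0) 0 m hlen rfl]
  conv_rhs => rw [hm, pvBOuter]
  rw [if_pos hlen]
  simp only [Nat.zero_add]
  have hmfe : xs.length - (0 + 1) = m := by omega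
  rw [hmfe, ← h1]
  simp
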